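-- pv_equiv track=rewrite | github.com/prashu07m/fitlife-ai-app | ml_recommendations.py | is_recipe_allergy_safe
-- ===== SOURCE A (Python) =====
-- def is_recipe_allergy_safe(recipe_ingredients, allergies):
--     """Check if a recipe is safe for user's allergies"""
--     if not allergies or all(allergy.strip() in ['none', 'no', 'n/a', ''] for allergy in allergies):
--         return True
--
--     # Common allergens mapping
--     allergen_mapping = {
--         'nuts': ['peanuts', 'almonds', 'walnuts', 'cashews', 'pistachios', 'hazelnuts', 'pecans', 'macadamia nuts', 'nut', 'nuts'],
--         'dairy': ['milk', 'cheese', 'yogurt', 'butter', 'cream', 'whey', 'casein', 'dairy'],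
--         'eggs': ['eggs', 'egg whites', 'egg yolks', 'egg'],
--         'gluten': ['wheat', 'gluten', 'barley', 'rye', 'bread', 'pasta', 'flour'],
--         'soy': ['soy', 'soybeans', 'tofu', 'soy sauce', 'edamame'],
--         'shellfish': ['shrimp', 'crab', 'lobster', 'oysters', 'mussels', 'clams', 'shellfish'],
--         'fish': ['fish', 'salmon', 'tuna', 'cod', 'tilapia', 'mackerel', 'seafood']
--     }
--
--     for ingredient in recipe_ingredients:
--         ingredient_lower = ingredient.lower()
--
--         for allergy in allergies:
--             allergy = allergy.strip().lower()
--
--             # Check direct match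
--             if allergy in ingredient_lower:
--                 return False
--
--             # Check allergen mapping
--             for allergen_type, allergen_list in allergen_mapping.items():
--                 if allergy in allergen_type or allergy in allergen_list:
--                     if any(allergen in ingredient_lower for allergen in allergen_list):
--                         return False
--
--     return True
-- ===== SOURCE B (Python) =====
-- def is_recipe_allergy_safe(recipe_ingredients, allergies):
--     """Check if a recipe is safe for user's allergies"""
--     if not allergies or all(allergy.strip() in ['none', 'no', 'n/a', ''] for allergy in allergies):
--         return True
--
--     allergen_mapping = {
--         'nuts': ['peanuts', 'almonds', 'walnuts', 'cashews', 'pistachios', 'hazelnuts', 'pecans', 'macadamia nuts', 'nut', 'nuts'],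
--         'dairy': ['milk', 'cheese', 'yogurt', 'butter', 'cream', 'whey', 'casein', 'dairy'],
--         'eggs': ['eggs', 'egg whites', 'egg yolks', 'egg'],
--         'gluten': ['wheat', 'gluten', 'barley', 'rye', 'bread', 'pasta', 'flour'],
--         'soy': ['soy', 'soybeans', 'tofu', 'soy sauce', 'edamame'],
--         'shellfish': ['shrimp', 'crab', 'lobster', 'oysters', 'mussels', 'clams', 'shellfish'],
--         'fish': ['fish', 'salmon', 'tuna', 'cod', 'tilapia', 'mackerel', 'seafood']
--     }
--
--     # Build the flat table of forbidden substrings once, instead of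
--     # re-deriving it for every ingredient.
--     forbidden = []
--     for allergy in allergies:
--         allergy = allergy.strip().lower()
--         forbidden.append(allergy)
--         for allergen_type, allergen_list in allergen_mapping.items():
--             if allergy in allergen_type or allergy in allergen_list:
--                 forbidden.extend(allergen_list)
--
--     for ingredient in recipe_ingredients:
--         ingredient_lower = ingredient.lower()
--         if any(term in ingredient_lower for term in forbidden):
--             return False
--     return True
-- ===== Notes on version B (the rewrite author's own statement) =====
-- stated objective: alternative
-- what changed: B precomputes the flat list of forbidden substrings from the allergies once (index-building phase), then makes a single pass over the ingredients, instead of A's per-ingredient re-derivation of mapping hits inside nested loops.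
import Mathlib
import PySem

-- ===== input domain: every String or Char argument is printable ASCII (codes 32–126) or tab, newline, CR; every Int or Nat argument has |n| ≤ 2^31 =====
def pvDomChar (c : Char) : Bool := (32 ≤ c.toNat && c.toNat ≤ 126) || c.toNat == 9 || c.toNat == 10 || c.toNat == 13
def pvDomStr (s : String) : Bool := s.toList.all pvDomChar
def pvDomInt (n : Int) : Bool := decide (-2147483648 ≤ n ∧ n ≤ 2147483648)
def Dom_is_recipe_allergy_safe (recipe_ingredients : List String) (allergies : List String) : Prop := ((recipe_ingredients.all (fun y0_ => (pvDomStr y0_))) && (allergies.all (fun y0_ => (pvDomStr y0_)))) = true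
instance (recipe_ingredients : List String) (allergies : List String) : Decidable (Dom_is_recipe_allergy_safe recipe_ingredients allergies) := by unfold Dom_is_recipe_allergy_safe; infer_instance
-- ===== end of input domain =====

-- B builds the flat forbidden-substring table once, then scans the ingredients in one pass;
-- A re-derives the mapping hits for every ingredient. Equivalence of return values on all inputs.

-- shared data: the allergen_mapping dict literal (insertion order)
def pvAllergenMapping : List (String × List String) :=
  [("nuts", ["peanuts", "almonds", "walnuts", "cashews", "pistachios", "hazelnuts", "pecans", "macadamia nuts", "nut", "nuts"]),
   ("dairy", ["milk", "cheese", "yogurt", "butter", "cream", "whey", "casein", "dairy"]),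
   ("eggs", ["eggs", "egg whites", "egg yolks", "egg"]),
   ("gluten", ["wheat", "gluten", "barley", "rye", "bread", "pasta", "flour"]),
   ("soy", ["soy", "soybeans", "tofu", "soy sauce", "edamame"]),
   ("shellfish", ["shrimp", "crab", "lobster", "oysters", "mussels", "clams", "shellfish"]),
   ("fish", ["fish", "salmon", "tuna", "cod", "tilapia", "mackerel", "seafood"])]

-- ===== PORT A =====
-- nested loops with early `return False` become nested `List.any`
def is_recipe_allergy_safe (recipe_ingredients : List String) (allergies : List String) : Bool :=
  if allergies.isEmpty || allergies.all (fun allergy => ["none", "no", "n/a", ""].contains (PySem.Str.strip allergy)) then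
    true
  else
    !(recipe_ingredients.any (fun ingredient =>
      let ingredient_lower := PySem.Str.lower ingredient
      allergies.any (fun allergy0 =>
        let allergy := PySem.Str.lower (PySem.Str.strip allergy0)
        PySem.Str.isIn allergy ingredient_lower ||
        pvAllergenMapping.any (fun p =>
          (PySem.Str.isIn allergy p.1 || p.2.contains allergy) &&
          p.2.any (fun allergen => PySem.Str.isIn allergen ingredient_lower)))))

-- ===== PORT B =====
-- index-building phase: the flat list of forbidden substrings
def pvBuildForbidden (allergies : List String) : List String :=
  allergies.foldl (fun acc allergy0 =>
    let allergy := PySem.Str.lower (PySem.Str.strip allergy0)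
    pvAllergenMapping.foldl
      (fun acc2 p => if PySem.Str.isIn allergy p.1 || p.2.contains allergy then acc2 ++ p.2 else acc2)
      (acc ++ [allergy])) []

def is_recipe_allergy_safe_alt (recipe_ingredients : List String) (allergies : List String) : Bool :=
  if allergies.isEmpty || allergies.all (fun allergy => ["none", "no", "n/a", ""].contains (PySem.Str.strip allergy)) then
    true
  else
    let forbidden := pvBuildForbidden allergies
    recipe_ingredients.all (fun ingredient =>
      !(forbidden.any (fun term => PySem.Str.isIn term (PySem.Str.lower ingredient))))

-- ===== PRECONDITION & SPEC =====
def Spec_is_recipe_allergy_safe (recipe_ingredients : List String) (allergies : List String) (out : Bool) : Prop := out = is_recipe_allergy_safe_alt recipe_ingredients allergies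
instance (recipe_ingredients : List String) (allergies : List String) (out : Bool) : Decidable (Spec_is_recipe_allergy_safe recipe_ingredients allergies out) := by unfold Spec_is_recipe_allergy_safe; infer_instance

-- ===== CLAIM (what is proved, stated in full; the proofs are below) =====
def Claim_equal_is_recipe_allergy_safe : Prop := ∀ (recipe_ingredients : List String) (allergies : List String), Dom_is_recipe_allergy_safe recipe_ingredients allergies → Spec_is_recipe_allergy_safe recipe_ingredients allergies (is_recipe_allergy_safe recipe_ingredients allergies)

-- ===== LEMMAS AND PROOFS =====

-- A's per-allergy test, as a predicate of the lowered ingredient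
def pvHit (il : String) (allergy0 : String) : Bool :=
  let allergy := PySem.Str.lower (PySem.Str.strip allergy0)
  PySem.Str.isIn allergy il ||
  pvAllergenMapping.any (fun p =>
    (PySem.Str.isIn allergy p.1 || p.2.contains allergy) &&
    p.2.any (fun allergen => PySem.Str.isIn allergen il))

theorem foldl_if_append_any (q : String → Bool) (c : String × List String → Bool)
    (m : List (String × List String)) (acc : List String) :
    (m.foldl (fun acc2 p => if c p then acc2 ++ p.2 else acc2) acc).any q
      = (acc.any q || m.any (fun p => c p && p.2.any q)) := by
  induction m generalizing acc with
  | nil => simp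
  | cons p m ih =>
    simp only [List.foldl_cons, List.any_cons, ih]
    by_cases h : c p = true <;> simp [h, Bool.or_assoc]

theorem buildForbidden_any (allergies : List String) (il : String) :
    (pvBuildForbidden allergies).any (fun term => PySem.Str.isIn term il)
      = allergies.any (pvHit il) := by
  unfold pvBuildForbidden
  suffices h : ∀ (al : List String) (acc : List String),
      (al.foldl (fun acc allergy0 =>
        let allergy := PySem.Str.lower (PySem.Str.strip allergy0)
        pvAllergenMapping.foldl
          (fun acc2 p => if PySem.Str.isIn allergy p.1 || p.2.contains allergy then acc2 ++ p.2 else acc2)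
          (acc ++ [allergy])) acc).any (fun term => PySem.Str.isIn term il)
        = (acc.any (fun term => PySem.Str.isIn term il) || al.any (pvHit il)) by
    simpa using h allergies []
  intro al
  induction al with
  | nil => simp
  | cons a al ih =>
    intro acc
    simp only [List.foldl_cons, List.any_cons, ih, foldl_if_append_any]
    simp [pvHit, Bool.or_assoc]

theorem hit_eq (allergies : List String) (ingredient : String) :
    (allergies.any (fun allergy0 =>
        let allergy := PySem.Str.lower (PySem.Str.strip allergy0)
        PySem.Str.isIn allergy (PySem.Str.lower ingredient) ||
        pvAllergenMapping.any (fun p =>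
          (PySem.Str.isIn allergy p.1 || p.2.contains allergy) &&
          p.2.any (fun allergen => PySem.Str.isIn allergen (PySem.Str.lower ingredient)))))
      = allergies.any (pvHit (PySem.Str.lower ingredient)) := by
  rfl

-- ===== VERDICT (by name: the statement is the Claim_ definition above) =====
theorem is_recipe_allergy_safe_spec : Claim_equal_is_recipe_allergy_safe := by
  unfold Claim_equal_is_recipe_allergy_safe
  intro ri al hdom
  clear hdom
  unfold Spec_is_recipe_allergy_safe is_recipe_allergy_safe is_recipe_allergy_safe_alt
  split
  · rfl
  · simp only [buildForbidden_any, hit_eq]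
    induction ri with
    | nil => simp
    | cons ing ri ih => simp [← ih]
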